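-- pv_equiv track=rewrite | github.com/daryll-ko/advent-of-code-2024 | 22b.py | all_diffs_and_nums
-- ===== SOURCE A (Python) =====
-- MOD = 16777216
--
-- def all_diffs_and_nums(n: int, steps: int) -> tuple[list[int], list[int]]:
--     cur = n
--
--     diffs = []
--     nums = []
--
--     for _ in range(steps):
--         next = (cur ^ (cur << 6)) % MOD
--         next = (next ^ (next >> 5)) % MOD
--         next = (next ^ (next << 11)) % MOD
--
--         diffs.append((next % 10) - (cur % 10))
--         nums.append(next % 10)
--
--         cur = next
--
--     return diffs, nums
-- ===== SOURCE B (Python) =====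
-- MOD = 16777216
--
-- # The step x -> (((x^(x<<6))%MOD ^ ...)...) is GF(2)-linear on the 24-bit state:
-- # precompute the image of each basis bit once, then advance the state by XOR-ing
-- # the table entries selected by the set bits of the current (reduced) state.
-- def _basis_images() -> list[int]:
--     table = []
--     for b in range(24):
--         x = 1 << b
--         x = (x ^ (x << 6)) % MOD
--         x = (x ^ (x >> 5)) % MOD
--         x = (x ^ (x << 11)) % MOD
--         table.append(x)
--     return table
--
-- _TABLE = _basis_images()
--
-- def all_diffs_and_nums(n: int, steps: int) -> tuple[list[int], list[int]]:
--     cur = n % MOD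
--     prev = n % 10
--     diffs = []
--     nums = []
--     for _ in range(steps):
--         nxt = 0
--         for b in range(24):
--             if (cur >> b) & 1:
--                 nxt ^= _TABLE[b]
--         d = nxt % 10
--         diffs.append(d - prev)
--         nums.append(d)
--         prev = d
--         cur = nxt
--     return diffs, nums
-- ===== Notes on version B (the rewrite author's own statement) =====
-- stated objective: alternative
-- what changed: B exploits that the xorshift step is GF(2)-linear on the 24-bit state: it precomputes the step image of each of the 24 basis bits once, then advances the reduced state by XOR-folding the table entries selected by the set bits of the current state, instead of running the shift/xor/mod recurrence on the state each step.
import Mathlib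
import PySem

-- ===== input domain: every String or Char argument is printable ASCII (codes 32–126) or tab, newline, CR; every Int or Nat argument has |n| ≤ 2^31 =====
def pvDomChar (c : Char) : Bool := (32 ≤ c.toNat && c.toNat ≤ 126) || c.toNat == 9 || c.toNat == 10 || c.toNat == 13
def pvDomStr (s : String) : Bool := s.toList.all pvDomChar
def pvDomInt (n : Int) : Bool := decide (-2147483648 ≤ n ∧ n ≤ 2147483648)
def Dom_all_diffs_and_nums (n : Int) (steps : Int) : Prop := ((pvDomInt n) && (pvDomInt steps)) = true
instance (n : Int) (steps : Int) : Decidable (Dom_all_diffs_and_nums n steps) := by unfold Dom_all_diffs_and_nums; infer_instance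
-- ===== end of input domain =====

-- B replaces the per-step xorshift recurrence by a different algorithm: the step is
-- GF(2)-linear on the 24-bit state, so B precomputes the step image of each basis bit
-- once and advances the state by XOR-folding table entries over the set bits
-- (objective: alternative; same asymptotic cost).

-- ===== PORT A =====
def all_diffs_and_nums (n : Int) (steps : Int) : List Int × List Int :=
  let res := (PySem.List.pyRange 0 steps 1).foldl
    (fun (st : Int × List Int × List Int) _ =>
      let cur := st.1
      let next1 := PySem.Int.mod (PySem.Int.bxor cur (cur <<< (6 : Nat))) 16777216
      let next2 := PySem.Int.mod (PySem.Int.bxor next1 (next1 >>> (5 : Nat))) 16777216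
      let next := PySem.Int.mod (PySem.Int.bxor next2 (next2 <<< (11 : Nat))) 16777216
      (next, st.2.1 ++ [PySem.Int.mod next 10 - PySem.Int.mod cur 10],
             st.2.2 ++ [PySem.Int.mod next 10]))
    (n, ([], []))
  (res.2.1, res.2.2)

-- ===== PORT B =====
-- _TABLE: step image of each of the 24 basis bits (module-level in Source B)
def pvTable : List Int :=
  (PySem.List.pyRange 0 24 1).map (fun b =>
    let x0 : Int := (1 : Int) <<< (b.toNat : Nat)
    let x1 := PySem.Int.mod (PySem.Int.bxor x0 (x0 <<< (6 : Nat))) 16777216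
    let x2 := PySem.Int.mod (PySem.Int.bxor x1 (x1 >>> (5 : Nat))) 16777216
    PySem.Int.mod (PySem.Int.bxor x2 (x2 <<< (11 : Nat))) 16777216)

def all_diffs_and_nums_alt (n : Int) (steps : Int) : List Int × List Int :=
  let res := (PySem.List.pyRange 0 steps 1).foldl
    (fun (st : Int × Int × List Int × List Int) _ =>
      let cur := st.1
      let prev := st.2.1
      let nxt := (PySem.List.pyRange 0 24 1).foldl
        (fun (acc : Int) (b : Int) =>
          if PySem.Int.band (cur >>> (b.toNat : Nat)) 1 ≠ 0 then
            PySem.Int.bxor acc (PySem.List.pyGetD pvTable b 0)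
          else acc) 0
      let d := PySem.Int.mod nxt 10
      (nxt, d, st.2.2.1 ++ [d - prev], st.2.2.2 ++ [d]))
    (PySem.Int.mod n 16777216, PySem.Int.mod n 10, ([], []))
  (res.2.2.1, res.2.2.2)

-- ===== PRECONDITION & SPEC =====
def Spec_all_diffs_and_nums (n : Int) (steps : Int) (out : List Int × List Int) : Prop :=
  out = all_diffs_and_nums_alt n steps
instance (n : Int) (steps : Int) (out : List Int × List Int) : Decidable (Spec_all_diffs_and_nums n steps out) := by
  unfold Spec_all_diffs_and_nums; infer_instance

-- ===== CLAIM =====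
def Claim_equal_all_diffs_and_nums : Prop :=
  ∀ (n : Int) (steps : Int), Dom_all_diffs_and_nums n steps →
    Spec_all_diffs_and_nums n steps (all_diffs_and_nums n steps)

-- ===== LEMMAS AND PROOFS =====

-- proof-side names for the three xorshift stages, on Int (as in A) and on Nat
def pvT1 (x : Int) : Int := PySem.Int.mod (PySem.Int.bxor x (x <<< (6 : Nat))) 16777216
def pvT2 (x : Int) : Int := PySem.Int.mod (PySem.Int.bxor x (x >>> (5 : Nat))) 16777216
def pvT3 (x : Int) : Int := PySem.Int.mod (PySem.Int.bxor x (x <<< (11 : Nat))) 16777216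
def pvNextA (x : Int) : Int := pvT3 (pvT2 (pvT1 x))

def pvS1 (x : Nat) : Nat := (x ^^^ (x <<< 6)) % 2 ^ 24
def pvS2 (x : Nat) : Nat := (x ^^^ (x >>> 5)) % 2 ^ 24
def pvS3 (x : Nat) : Nat := (x ^^^ (x <<< 11)) % 2 ^ 24
def pvF (x : Nat) : Nat := pvS3 (pvS2 (pvS1 x))

lemma pvModM_natCast (a : Nat) : PySem.Int.mod (a : Int) 16777216 = ((a % 2 ^ 24 : Nat) : Int) := by
  rw [show (16777216 : Int) = ((16777216 : Nat) : Int) from by norm_num, PySem.Int.mod_natCast]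
  norm_num

lemma pvT1_cast (a : Nat) : pvT1 (a : Int) = ((pvS1 a : Nat) : Int) := by
  rw [pvT1, ← Int.natCast_shiftLeft, PySem.Int.bxor_natCast, pvModM_natCast]; rfl

lemma pvT2_cast (a : Nat) : pvT2 (a : Int) = ((pvS2 a : Nat) : Int) := by
  rw [pvT2, ← Int.natCast_shiftRight, PySem.Int.bxor_natCast, pvModM_natCast]; rfl

lemma pvT3_cast (a : Nat) : pvT3 (a : Int) = ((pvS3 a : Nat) : Int) := by
  rw [pvT3, ← Int.natCast_shiftLeft, PySem.Int.bxor_natCast, pvModM_natCast]; rfl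

lemma pvNextA_cast (m : Nat) : pvNextA (m : Int) = ((pvF m : Nat) : Int) := by
  rw [pvNextA, pvT1_cast, pvT2_cast, pvT3_cast]; rfl

-- GF(2)-linearity of the three stages
lemma pvS1_xor (a b : Nat) : pvS1 (a ^^^ b) = pvS1 a ^^^ pvS1 b := by
  apply Nat.eq_of_testBit_eq; intro i
  simp only [pvS1, Nat.testBit_mod_two_pow, Nat.testBit_xor, Nat.testBit_shiftLeft]
  by_cases hi : i < 24 <;> by_cases h6 : i ≥ 6 <;>
    simp [hi, h6] <;>
    cases a.testBit i <;> cases b.testBit i <;>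
      cases a.testBit (i - 6) <;> cases b.testBit (i - 6) <;> rfl

lemma pvS2_xor (a b : Nat) : pvS2 (a ^^^ b) = pvS2 a ^^^ pvS2 b := by
  apply Nat.eq_of_testBit_eq; intro i
  simp only [pvS2, Nat.testBit_mod_two_pow, Nat.testBit_xor, Nat.testBit_shiftRight]
  by_cases hi : i < 24 <;>
    simp [hi] <;>
    cases a.testBit i <;> cases b.testBit i <;>
      cases a.testBit (5 + i) <;> cases b.testBit (5 + i) <;> rfl

lemma pvS3_xor (a b : Nat) : pvS3 (a ^^^ b) = pvS3 a ^^^ pvS3 b := by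
  apply Nat.eq_of_testBit_eq; intro i
  simp only [pvS3, Nat.testBit_mod_two_pow, Nat.testBit_xor, Nat.testBit_shiftLeft]
  by_cases hi : i < 24 <;> by_cases h11 : i ≥ 11 <;>
    simp [hi, h11] <;>
    cases a.testBit i <;> cases b.testBit i <;>
      cases a.testBit (i - 11) <;> cases b.testBit (i - 11) <;> rfl

lemma pvF_xor (a b : Nat) : pvF (a ^^^ b) = pvF a ^^^ pvF b := by
  simp [pvF, pvS1_xor, pvS2_xor, pvS3_xor]

lemma pvF_zero : pvF 0 = 0 := by decide

lemma pvF_lt (x : Nat) : pvF x < 2 ^ 24 := by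
  have : pvS3 (pvS2 (pvS1 x)) < 2 ^ 24 := Nat.mod_lt _ (by norm_num)
  simpa [pvF] using this

-- the first stage only reads the low 24 bits
lemma pvS1_mod (x : Nat) : pvS1 (x % 2 ^ 24) = pvS1 x := by
  apply Nat.eq_of_testBit_eq; intro i
  simp only [pvS1, Nat.testBit_mod_two_pow, Nat.testBit_xor, Nat.testBit_shiftLeft]
  by_cases hi : i < 24
  · by_cases h6 : i ≥ 6
    · simp [hi, h6, show i - 6 < 24 from by omega]
    · simp [hi, h6]
  · simp [hi]

lemma pvF_mod (x : Nat) : pvF (x % 2 ^ 24) = pvF x := by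
  unfold pvF; rw [pvS1_mod]

-- bit-decomposition fold (proof-side model of B's inner loop)
def pvFoldBits (p : Nat) : Nat → Nat
  | 0 => 0
  | k + 1 => if p.testBit k then pvFoldBits p k ^^^ pvF (2 ^ k) else pvFoldBits p k

lemma pvMod_succ_xor (p k : Nat) :
    p % 2 ^ (k + 1) = p % 2 ^ k ^^^ (if p.testBit k then 2 ^ k else 0) := by
  apply Nat.eq_of_testBit_eq; intro i
  by_cases hb : p.testBit k
  · simp only [hb, if_true, Nat.testBit_xor, Nat.testBit_mod_two_pow, Nat.testBit_two_pow]
    rcases Nat.lt_trichotomy i k with h | h | h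
    · simp [show i < k + 1 from by omega, h, show k ≠ i from by omega]
    · subst h; simp [show i < i + 1 from by omega, show ¬ i < i from by omega, hb]
    · simp [show ¬ i < k + 1 from by omega, show ¬ i < k from by omega, show k ≠ i from by omega]
  · simp only [hb, if_false, Nat.xor_zero, Nat.testBit_mod_two_pow]
    rcases Nat.lt_trichotomy i k with h | h | h
    · simp [show i < k + 1 from by omega, h]
    · subst h; simp [show i < i + 1 from by omega, show ¬ i < i from by omega, hb]
    · simp [show ¬ i < k + 1 from by omega, show ¬ i < k from by omega]

lemma pvFoldBits_eq (p : Nat) : ∀ k, pvFoldBits p k = pvF (p % 2 ^ k)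
  | 0 => by simp [pvFoldBits, Nat.mod_one, pvF_zero]
  | k + 1 => by
    by_cases hb : p.testBit k
    · rw [pvFoldBits, if_pos hb, pvFoldBits_eq p k, pvMod_succ_xor, pvF_xor, if_pos hb]
    · rw [pvFoldBits, if_neg hb, pvFoldBits_eq p k, pvMod_succ_xor, pvF_xor, if_neg hb,
        pvF_zero, Nat.xor_zero]

-- two's-complement bridge: bits of (2^24 - 1 - q) are the flipped bits of q
lemma pvTestBit_mask_sub {q : Nat} (hq : q < 2 ^ 24) (i : Nat) :
    (2 ^ 24 - 1 - q).testBit i = (decide (i < 24) && ! q.testBit i) := by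
  rw [Nat.testBit_eq_decide_div_mod_eq, Nat.testBit_eq_decide_div_mod_eq]
  by_cases hi : i < 24
  · have hC : 2 ^ i * 2 ^ (24 - i) = 2 ^ 24 := by
      rw [← pow_add]; congr 1; omega
    have hA : 0 < 2 ^ i := Nat.two_pow_pos i
    have hCe : 2 ^ (24 - i) % 2 = 0 := by
      have h1 : 24 - i = (24 - i - 1) + 1 := by omega
      rw [h1, pow_succ]; omega
    have hM : (2 : Nat) ^ 24 = 16777216 := by norm_num
    set A := 2 ^ i with hAdef
    set C := 2 ^ (24 - i) with hCdef
    have hq2 : A * (q / A) + q % A = q := Nat.div_add_mod q A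
    have hrA : q % A < A := Nat.mod_lt _ hA
    have haC : q / A < C := Nat.div_lt_of_lt_mul (by omega)
    have hXle : A * (q / A) + A ≤ 2 ^ 24 := by
      have h1 : q / A + 1 ≤ C := by omega
      calc A * (q / A) + A = A * (q / A + 1) := by ring
        _ ≤ A * C := Nat.mul_le_mul_left A h1
        _ = 2 ^ 24 := hC
    have key : (2 ^ 24 - 1 - q) = A * (C - 1 - q / A) + (A - 1 - q % A) := by
      have e1 : A * (C - 1 - q / A) = 2 ^ 24 - A - A * (q / A) := by
        rw [Nat.mul_sub, Nat.mul_sub, mul_one, hC]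
      rw [e1]; omega
    have hr0 : (A - 1 - q % A) / A = 0 := Nat.div_eq_of_lt (by omega)
    have hdiv : (2 ^ 24 - 1 - q) / A = C - 1 - q / A := by
      rw [key, Nat.mul_add_div hA, hr0, Nat.add_zero]
    rw [hdiv]
    by_cases hp : q / A % 2 = 1
    · simp [hi, hp, show ¬ ((C - 1 - q / A) % 2 = 1) from by omega]
    · simp [hi, hp, show (C - 1 - q / A) % 2 = 1 from by omega]
  · have hle : 2 ^ 24 ≤ 2 ^ i := Nat.pow_le_pow_right (by norm_num) (by omega)
    have h0 : (2 ^ 24 - 1 - q) / 2 ^ i = 0 := Nat.div_eq_of_lt (by omega)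
    rw [h0]; simp [hi]

lemma pvTestBit_64m63 (m i : Nat) :
    (64 * m + 63).testBit i = (decide (i < 6) || m.testBit (i - 6)) := by
  by_cases hi : i < 6
  · rw [Nat.testBit_eq_decide_div_mod_eq]
    have h64 : 2 ^ i * 2 ^ (6 - i) = 64 := by
      rw [← pow_add, show i + (6 - i) = 6 from by omega]; norm_num
    have hA : 0 < 2 ^ i := Nat.two_pow_pos i
    have hAle : 2 ^ i ≤ 32 := by
      calc 2 ^ i ≤ 2 ^ 5 := Nat.pow_le_pow_right (by norm_num) (by omega)
        _ = 32 := by norm_num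
    set A := 2 ^ i with hAdef
    have e1 : 64 * m + 63 = A * (2 ^ (6 - i) * m) + 63 := by
      rw [← mul_assoc, h64]
    have hdiv : (64 * m + 63) / A = 2 ^ (6 - i) * m + 63 / A := by
      rw [e1, Nat.mul_add_div hA]
    have hB1 : 1 ≤ 2 ^ (6 - i) := Nat.one_le_two_pow
    have h63 : 63 / A = 2 ^ (6 - i) - 1 := by
      have e2 : 63 = A * (2 ^ (6 - i) - 1) + (A - 1) := by
        rw [Nat.mul_sub, mul_one, h64]; omega
      rw [e2, Nat.mul_add_div hA, Nat.div_eq_of_lt (by omega), Nat.add_zero]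
    have hE : 2 ^ (6 - i) % 2 = 0 := by
      rw [show 6 - i = (5 - i) + 1 from by omega, pow_succ]; omega
    have hEm : (2 ^ (6 - i) * m) % 2 = 0 := by
      rw [Nat.mul_mod, hE]; simp
    have hodd : (2 ^ (6 - i) * m + (2 ^ (6 - i) - 1)) % 2 = 1 := by omega
    simp [hi, hdiv, h63, hodd]
  · rw [Nat.testBit_eq_decide_div_mod_eq, Nat.testBit_eq_decide_div_mod_eq]
    have hp : (2 : Nat) ^ i = 2 ^ 6 * 2 ^ (i - 6) := by
      rw [← pow_add]; congr 1; omega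
    have hdd : (64 * m + 63) / 2 ^ i = m / 2 ^ (i - 6) := by
      rw [hp, ← Nat.div_div_eq_div_mul, show (2 : Nat) ^ 6 = 64 from by norm_num,
        show (64 * m + 63) / 64 = m from by omega]
    rw [hdd]; simp [hi]

-- A's first stage on a negative seed, expressed over the reduced state
lemma pvNeg_stage1 (m : Nat) :
    (m ^^^ (64 * m + 63)) % 2 ^ 24 = pvS1 (2 ^ 24 - 1 - m % 2 ^ 24) := by
  apply Nat.eq_of_testBit_eq; intro i
  have hq : m % 2 ^ 24 < 2 ^ 24 := Nat.mod_lt _ (by norm_num)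
  simp only [pvS1, Nat.testBit_mod_two_pow, Nat.testBit_xor, Nat.testBit_shiftLeft,
    pvTestBit_64m63, pvTestBit_mask_sub hq]
  by_cases hi : i < 24
  · by_cases h6 : 6 ≤ i
    · have h1 : i - 6 < 24 := by omega
      cases hm1 : m.testBit i <;> cases hm2 : m.testBit (i - 6) <;>
        simp [hi, h6, h1, hm1, hm2, show ¬ i < 6 from by omega, Nat.testBit_mod_two_pow]
    · cases hm1 : m.testBit i <;>
        simp [hi, h6, hm1, show i < 6 from by omega, Nat.testBit_mod_two_pow]
  · simp [hi]

-- the heart: A's step equals pvF of the reduced (mod 2^24) state, for every Int seed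
lemma pvNextA_mod (cur : Int) :
    pvNextA cur = ((pvF ((PySem.Int.mod cur 16777216).toNat) : Nat) : Int) := by
  have hM : (2 : Nat) ^ 24 = 16777216 := by norm_num
  by_cases hc : 0 ≤ cur
  · obtain ⟨m, rfl⟩ : ∃ m : Nat, cur = (m : Int) := ⟨cur.toNat, (Int.toNat_of_nonneg hc).symm⟩
    rw [pvNextA_cast, pvModM_natCast, Int.toNat_natCast, pvF_mod]
  · push_neg at hc
    set m := (-cur - 1).toNat with hmdef
    have hm : cur = -(m : Int) - 1 := by omega
    have hsh : cur <<< (6 : Nat) = -(64 * (m : Int) + 64) := by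
      rw [Int.shiftLeft_eq, show (2 : Int) ^ 6 = 64 from by norm_num]; omega
    have hb : PySem.Int.bxor cur (cur <<< (6 : Nat)) = ((m ^^^ (64 * m + 63) : Nat) : Int) := by
      have e1 : (-cur - 1).toNat = m := by omega
      have e2 : (-(cur <<< (6 : Nat)) - 1).toNat = 64 * m + 63 := by rw [hsh]; omega
      simp only [PySem.Int.bxor]
      rw [if_neg (by omega), if_neg (by rw [hsh]; omega), e1, e2]
    have hstage1 : pvT1 cur = (((m ^^^ (64 * m + 63)) % 2 ^ 24 : Nat) : Int) := by
      rw [pvT1, hb, pvModM_natCast]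
    have hp : (PySem.Int.mod cur 16777216).toNat = 2 ^ 24 - 1 - m % 2 ^ 24 := by
      rw [PySem.Int.mod_eq_emod_of_pos (by norm_num), hM]; omega
    rw [pvNextA, hstage1, pvT2_cast, pvT3_cast, hp]
    rw [show pvF (2 ^ 24 - 1 - m % 2 ^ 24)
        = pvS3 (pvS2 (pvS1 (2 ^ 24 - 1 - m % 2 ^ 24))) from rfl, ← pvNeg_stage1]

lemma pvNextA_bounds (cur : Int) : 0 ≤ pvNextA cur ∧ pvNextA cur < 16777216 := by
  rw [pvNextA_mod]
  constructor
  · exact Int.natCast_nonneg _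
  · have := pvF_lt ((PySem.Int.mod cur 16777216).toNat)
    omega

-- B's inner loop condition reads bit b of the state
lemma pvCond_iff (p k : Nat) :
    (PySem.Int.band ((p : Int) >>> (k : Nat)) 1 ≠ 0) ↔ p.testBit k = true := by
  rw [← Int.natCast_shiftRight, show (1 : Int) = ((1 : Nat) : Int) from by norm_num,
    PySem.Int.band_natCast, Nat.testBit_eq_decide_div_mod_eq, Nat.shiftRight_eq_div_pow,
    Nat.and_one_is_mod]
  have hr : p / 2 ^ k % 2 < 2 := Nat.mod_lt _ (by norm_num)
  generalize hg : p / 2 ^ k % 2 = r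
  rw [hg] at hr
  simp; omega

-- the table entry at index k is pvF (2^k)
lemma pvTable_get (k : Nat) (hk : k < 24) :
    PySem.List.pyGetD pvTable ((k : Nat) : Int) 0 = ((pvF (2 ^ k) : Nat) : Int) := by
  have htab : pvTable = (PySem.List.pyRange 0 ((24 : Nat) : Int)).map (fun b =>
      let x0 : Int := (1 : Int) <<< (b.toNat : Nat)
      let x1 := PySem.Int.mod (PySem.Int.bxor x0 (x0 <<< (6 : Nat))) 16777216
      let x2 := PySem.Int.mod (PySem.Int.bxor x1 (x1 >>> (5 : Nat))) 16777216
      PySem.Int.mod (PySem.Int.bxor x2 (x2 <<< (11 : Nat))) 16777216) := by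
    norm_num [pvTable]
  rw [htab, PySem.List.pyGetD_map_pyRange _ 24 k 0 hk]
  show pvT3 (pvT2 (pvT1 ((1 : Int) <<< (((k : Int)).toNat : Nat)))) = _
  rw [Int.toNat_natCast, show (1 : Int) = ((1 : Nat) : Int) from by norm_num,
    ← Int.natCast_shiftLeft, Nat.one_shiftLeft]
  exact pvNextA_cast (2 ^ k)

-- B's inner loop over the first K bits computes pvFoldBits
lemma pvInner_fold_aux (p : Nat) : ∀ K, K ≤ 24 →
    (List.range K).foldl
      (fun (acc : Int) (k : Nat) =>
        if PySem.Int.band (((p : Nat) : Int) >>> (((k : Int)).toNat : Nat)) 1 ≠ 0 then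
          PySem.Int.bxor acc (PySem.List.pyGetD pvTable ((k : Int)) 0)
        else acc) 0
    = ((pvFoldBits p K : Nat) : Int)
  | 0, _ => by simp [pvFoldBits]
  | K + 1, hK => by
    rw [List.range_succ, List.foldl_append, pvInner_fold_aux p K (by omega)]
    simp only [List.foldl_cons, List.foldl_nil, Int.toNat_natCast]
    by_cases hb : p.testBit K
    · rw [if_pos (by rw [pvCond_iff]; exact hb), pvTable_get K (by omega),
        PySem.Int.bxor_natCast]
      rw [show pvFoldBits p (K + 1) = pvFoldBits p K ^^^ pvF (2 ^ K) from by
        rw [pvFoldBits, if_pos hb]]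
    · rw [if_neg (by rw [pvCond_iff]; simp [hb]),
        show pvFoldBits p (K + 1) = pvFoldBits p K from by rw [pvFoldBits, if_neg hb]]

lemma pvInner_fold (p : Nat) (hp : p < 2 ^ 24) :
    (PySem.List.pyRange 0 24 1).foldl
      (fun (acc : Int) (b : Int) =>
        if PySem.Int.band (((p : Nat) : Int) >>> (b.toNat : Nat)) 1 ≠ 0 then
          PySem.Int.bxor acc (PySem.List.pyGetD pvTable b 0)
        else acc) 0
    = ((pvF p : Nat) : Int) := by
  rw [show (24 : Int) = ((24 : Nat) : Int) from by norm_num, PySem.List.pyRange_zero_natCast,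
    List.foldl_map, pvInner_fold_aux p 24 (le_refl 24), pvFoldBits_eq p 24,
    Nat.mod_eq_of_lt hp]

-- the two loops, related state by state
lemma pvOuter_fold (l : List Int) : ∀ (cur : Int) (ds ns : List Int),
    l.foldl
      (fun (st : Int × Int × List Int × List Int) _ =>
        let c := st.1
        let prev := st.2.1
        let nxt := (PySem.List.pyRange 0 24 1).foldl
          (fun (acc : Int) (b : Int) =>
            if PySem.Int.band (c >>> (b.toNat : Nat)) 1 ≠ 0 then
              PySem.Int.bxor acc (PySem.List.pyGetD pvTable b 0)
            else acc) 0
        let d := PySem.Int.mod nxt 10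
        (nxt, d, st.2.2.1 ++ [d - prev], st.2.2.2 ++ [d]))
      (PySem.Int.mod cur 16777216, PySem.Int.mod cur 10, ds, ns)
    = (PySem.Int.mod (l.foldl
        (fun (st : Int × List Int × List Int) _ =>
          let c := st.1
          let next1 := PySem.Int.mod (PySem.Int.bxor c (c <<< (6 : Nat))) 16777216
          let next2 := PySem.Int.mod (PySem.Int.bxor next1 (next1 >>> (5 : Nat))) 16777216
          let next := PySem.Int.mod (PySem.Int.bxor next2 (next2 <<< (11 : Nat))) 16777216
          (next, st.2.1 ++ [PySem.Int.mod next 10 - PySem.Int.mod c 10],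
                 st.2.2 ++ [PySem.Int.mod next 10]))
        (cur, ds, ns)).1 16777216,
       PySem.Int.mod (l.foldl
        (fun (st : Int × List Int × List Int) _ =>
          let c := st.1
          let next1 := PySem.Int.mod (PySem.Int.bxor c (c <<< (6 : Nat))) 16777216
          let next2 := PySem.Int.mod (PySem.Int.bxor next1 (next1 >>> (5 : Nat))) 16777216
          let next := PySem.Int.mod (PySem.Int.bxor next2 (next2 <<< (11 : Nat))) 16777216
          (next, st.2.1 ++ [PySem.Int.mod next 10 - PySem.Int.mod c 10],
                 st.2.2 ++ [PySem.Int.mod next 10]))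
        (cur, ds, ns)).1 10,
       (l.foldl
        (fun (st : Int × List Int × List Int) _ =>
          let c := st.1
          let next1 := PySem.Int.mod (PySem.Int.bxor c (c <<< (6 : Nat))) 16777216
          let next2 := PySem.Int.mod (PySem.Int.bxor next1 (next1 >>> (5 : Nat))) 16777216
          let next := PySem.Int.mod (PySem.Int.bxor next2 (next2 <<< (11 : Nat))) 16777216
          (next, st.2.1 ++ [PySem.Int.mod next 10 - PySem.Int.mod c 10],
                 st.2.2 ++ [PySem.Int.mod next 10]))
        (cur, ds, ns)).2) := by
  induction l with
  | nil => intro cur ds ns; rfl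
  | cons x xs ih =>
    intro cur ds ns
    simp only [List.foldl_cons]
    have hc : PySem.Int.mod cur 16777216 = (((PySem.Int.mod cur 16777216).toNat : Nat) : Int) :=
      (Int.toNat_of_nonneg (PySem.Int.mod_nonneg _ (by norm_num))).symm
    have hp : (PySem.Int.mod cur 16777216).toNat < 2 ^ 24 := by
      have h1 := PySem.Int.mod_lt cur (b := 16777216) (by norm_num)
      have h2 := PySem.Int.mod_nonneg cur (b := 16777216) (by norm_num)
      omega
    have hinner : (PySem.List.pyRange 0 24 1).foldl
        (fun (acc : Int) (b : Int) =>
          if PySem.Int.band ((PySem.Int.mod cur 16777216) >>> (b.toNat : Nat)) 1 ≠ 0 then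
            PySem.Int.bxor acc (PySem.List.pyGetD pvTable b 0)
          else acc) 0 = pvNextA cur := by
      rw [hc, pvInner_fold _ hp, ← pvNextA_mod]
    have hA : PySem.Int.mod
        (PySem.Int.bxor
          (PySem.Int.mod
            (PySem.Int.bxor (PySem.Int.mod (PySem.Int.bxor cur (cur <<< (6 : Nat))) 16777216)
              ((PySem.Int.mod (PySem.Int.bxor cur (cur <<< (6 : Nat))) 16777216) >>> (5 : Nat)))
            16777216)
          ((PySem.Int.mod
            (PySem.Int.bxor (PySem.Int.mod (PySem.Int.bxor cur (cur <<< (6 : Nat))) 16777216)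
              ((PySem.Int.mod (PySem.Int.bxor cur (cur <<< (6 : Nat))) 16777216) >>> (5 : Nat)))
            16777216) <<< (11 : Nat)))
        16777216 = pvNextA cur := rfl
    rw [hinner, hA]
    have hred : PySem.Int.mod (pvNextA cur) 16777216 = pvNextA cur := by
      obtain ⟨h1, h2⟩ := pvNextA_bounds cur
      rw [PySem.Int.mod_eq_emod_of_pos (by norm_num), Int.emod_eq_of_lt h1 h2]
    have ih' := ih (pvNextA cur)
      (ds ++ [PySem.Int.mod (pvNextA cur) 10 - PySem.Int.mod cur 10])
      (ns ++ [PySem.Int.mod (pvNextA cur) 10])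
    rw [hred] at ih'
    exact ih'

-- ===== VERDICT =====
theorem all_diffs_and_nums_spec : Claim_equal_all_diffs_and_nums := by
  intro n steps _
  show all_diffs_and_nums n steps = all_diffs_and_nums_alt n steps
  unfold all_diffs_and_nums all_diffs_and_nums_alt
  rw [pvOuter_fold]
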